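-- pv_equiv track=rewrite | github.com/bradley-noah/AlgorithmAnimation | hungarian/hungarian_testing.py | verify_assignment
-- ===== SOURCE A (Python) =====
-- import itertools
--
-- def brute_force_min_cost(cost_matrix):
--     n = len(cost_matrix)
--     if n == 0:
--         return 0
--
--     best = float("inf")
--     for perm in itertools.permutations(range(n)):
--         total = sum(cost_matrix[i][perm[i]] for i in range(n))
--         if total < best:
--             best = total
--     return best
--
-- def verify_assignment(cost_matrix, assignment, reported_total, check_optimal=True):
--     n = len(cost_matrix)
--
--     if n == 0:
--         if assignment != []:
--             return False, "Expected empty assignment for empty matrix."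
--         if reported_total != 0:
--             return False, "Expected zero cost for empty matrix."
--         return True, "Valid empty assignment."
--
--     if len(assignment) != n:
--         return False, "Assignment size does not match matrix size."
--
--     rows = [pair[0] for pair in assignment]
--     cols = [pair[1] for pair in assignment]
--
--     if sorted(rows) != list(range(n)):
--         return False, "Rows are not assigned exactly once."
--     if sorted(cols) != list(range(n)):
--         return False, "Columns are not assigned exactly once."
--
--     computed_total = sum(cost_matrix[i][j] for i, j in assignment)
--     if computed_total != reported_total:
--         return False, "Reported total cost does not match assignment sum."
--
--     if check_optimal:
--         best_possible = brute_force_min_cost(cost_matrix)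
--         if reported_total != best_possible:
--             return False, f"Non-optimal result: got {reported_total}, expected {best_possible}."
--
--     return True, "Assignment is valid and optimal."
-- ===== SOURCE B (Python) =====
-- def verify_assignment(cost_matrix, assignment, reported_total, check_optimal=True):
--     n = len(cost_matrix)
--
--     if n == 0:
--         if assignment != []:
--             return False, "Expected empty assignment for empty matrix."
--         if reported_total != 0:
--             return False, "Expected zero cost for empty matrix."
--         return True, "Valid empty assignment."
--
--     if len(assignment) != n:
--         return False, "Assignment size does not match matrix size."
--
--     rows = [pair[0] for pair in assignment]
--     cols = [pair[1] for pair in assignment]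
--
--     if set(rows) != set(range(n)):
--         return False, "Rows are not assigned exactly once."
--     if set(cols) != set(range(n)):
--         return False, "Columns are not assigned exactly once."
--
--     computed_total = sum(cost_matrix[i][j] for i, j in assignment)
--     if computed_total != reported_total:
--         return False, "Reported total cost does not match assignment sum."
--
--     if check_optimal:
--         best_possible = _dp_min_cost(cost_matrix)
--         if reported_total != best_possible:
--             return False, f"Non-optimal result: got {reported_total}, expected {best_possible}."
--
--     return True, "Assignment is valid and optimal."
--
--
-- def _dp_min_cost(cost_matrix):
--     # memoised top-down DP over the set of still-unassigned columns
--     n = len(cost_matrix)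
--     memo = {}
--
--     def solve(i, cols):
--         if not cols:
--             return 0
--         if cols in memo:
--             return memo[cols]
--         row = cost_matrix[i]
--         best = None
--         for k in range(len(cols)):
--             rest = cols[:k] + cols[k + 1:]
--             cand = row[cols[k]] + solve(i + 1, rest)
--             if best is None or cand < best:
--                 best = cand
--         memo[cols] = best
--         return best
--
--     return solve(0, tuple(range(n)))
-- ===== Notes on version B (the rewrite author's own statement) =====
-- stated objective: alternative
-- what changed: The optimality check's exhaustive scan over all n! permutations is replaced by a memoised top-down dynamic program over subsets of unassigned columns, and the sorted-list permutation validations are replaced by hash-set comparisons.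
import Mathlib
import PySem

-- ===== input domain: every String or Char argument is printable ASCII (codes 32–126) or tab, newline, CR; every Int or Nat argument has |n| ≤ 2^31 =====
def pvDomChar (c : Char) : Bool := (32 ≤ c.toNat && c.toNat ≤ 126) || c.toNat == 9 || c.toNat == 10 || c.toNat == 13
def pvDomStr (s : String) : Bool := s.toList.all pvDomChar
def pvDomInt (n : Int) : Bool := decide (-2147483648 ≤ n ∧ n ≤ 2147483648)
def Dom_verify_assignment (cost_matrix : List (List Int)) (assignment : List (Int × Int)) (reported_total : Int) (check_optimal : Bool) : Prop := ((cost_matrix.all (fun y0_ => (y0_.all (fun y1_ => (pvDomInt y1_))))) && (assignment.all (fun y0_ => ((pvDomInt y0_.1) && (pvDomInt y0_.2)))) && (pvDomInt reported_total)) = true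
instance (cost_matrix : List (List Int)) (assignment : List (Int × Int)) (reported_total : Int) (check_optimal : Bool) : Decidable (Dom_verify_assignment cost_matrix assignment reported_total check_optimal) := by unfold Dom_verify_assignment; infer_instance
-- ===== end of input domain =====

-- B computes the optimality check's minimum cost by a memoised top-down DP over
-- the set of still-unassigned columns instead of scanning all permutations, and
-- validates rows/columns with set comparisons instead of sorting; same values.

-- ===== PORT A =====

-- A's `best = float("inf")` is modelled as `none`: every Int total compares below it
def brute_force_min_cost (cost_matrix : List (List Int)) : Int :=
  let n : Int := PySem.List.len cost_matrix
  if n = 0 then 0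
  else
    let best : Option Int :=
      -- itertools.permutations(range(n)): PySem.List.permutations at r = full length
      (PySem.List.permutations (PySem.List.pyRange 0 n 1) (PySem.List.pyRange 0 n 1).length).foldl
        (fun best perm =>
          let total : Int := (PySem.List.pyRange 0 n 1).foldl
            (fun s i => s + PySem.List.pyGetD (PySem.List.pyGetD cost_matrix i [])
              (PySem.List.pyGetD perm i 0) 0) 0
          match best with
          | none => some total
          | some b => if total < b then some total else best)
        none
    best.getD 0  -- n ≠ 0: at least one permutation exists, so `best` is an Int

def verify_assignment (cost_matrix : List (List Int)) (assignment : List (Int × Int)) (reported_total : Int) (check_optimal : Bool) : Bool × String :=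
  let n : Int := PySem.List.len cost_matrix
  if n = 0 then
    if assignment ≠ [] then (false, "Expected empty assignment for empty matrix.")
    else if reported_total ≠ 0 then (false, "Expected zero cost for empty matrix.")
    else (true, "Valid empty assignment.")
  else if PySem.List.len assignment ≠ n then
    (false, "Assignment size does not match matrix size.")
  else
    let rows := assignment.map (fun pair => pair.1)
    let cols := assignment.map (fun pair => pair.2)
    if PySem.List.sorted rows (fun x => x) ≠ PySem.List.pyRange 0 n 1 then
      (false, "Rows are not assigned exactly once.")
    else if PySem.List.sorted cols (fun x => x) ≠ PySem.List.pyRange 0 n 1 then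
      (false, "Columns are not assigned exactly once.")
    else
      let computed_total : Int := assignment.foldl
        (fun s p => s + PySem.List.pyGetD (PySem.List.pyGetD cost_matrix p.1 []) p.2 0) 0
      if computed_total ≠ reported_total then
        (false, "Reported total cost does not match assignment sum.")
      else if check_optimal = true then
        let best_possible := brute_force_min_cost cost_matrix
        if reported_total ≠ best_possible then
          (false, "Non-optimal result: got " ++ PySem.Int.toStr reported_total ++ ", expected "
            ++ PySem.Int.toStr best_possible ++ ".")
        else (true, "Assignment is valid and optimal.")
      else (true, "Assignment is valid and optimal.")

-- ===== PORT B =====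

-- `solve(i, cols)` / its `for k in range(len(cols))` loop; the Nat `fuel` argument
-- (= len(cols) at every real call) only makes the recursion structurally terminating.
mutual
def dp_solve (cost_matrix : List (List Int)) (i : Int) (cols : List Int)
    (memo : PySem.Dict (List Int) Int) (fuel : Nat) : Int × PySem.Dict (List Int) Int :=
  if cols.isEmpty then (0, memo)
  else
    match memo.get? cols with
    | some v => (v, memo)
    | none =>
      match fuel with
      | 0 => (0, memo)  -- unreachable: every call has fuel = cols.length > 0 here
      | fuel' + 1 =>
        let row := PySem.List.pyGetD cost_matrix i []
        let res := dp_loop cost_matrix i cols row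
          (PySem.List.pyRange 0 (PySem.List.len cols) 1) none memo fuel'
        let b := res.1.getD 0  -- unreachable default: cols ≠ [] so the loop set `best`
        (b, res.2.insert cols b)
  termination_by (fuel, 0)

def dp_loop (cost_matrix : List (List Int)) (i : Int) (cols row : List Int)
    (pending : List Int) (best : Option Int) (memo : PySem.Dict (List Int) Int) (fuel' : Nat) :
    Option Int × PySem.Dict (List Int) Int :=
  match pending with
  | [] => (best, memo)
  | k :: rest =>
    -- rest = cols[:k] + cols[k+1:]
    let restCols := PySem.List.slice cols none (some k) ++ PySem.List.slice cols (some (k + 1)) none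
    let sub := dp_solve cost_matrix (i + 1) restCols memo fuel'
    let cand := PySem.List.pyGetD row (PySem.List.pyGetD cols k 0) 0 + sub.1
    let best' : Option Int :=
      match best with
      | none => some cand
      | some b => if cand < b then some cand else best
    dp_loop cost_matrix i cols row rest best' sub.2 fuel'
  termination_by (fuel', pending.length + 1)
end

def dp_min_cost (cost_matrix : List (List Int)) : Int :=
  let n : Int := PySem.List.len cost_matrix
  (dp_solve cost_matrix 0 (PySem.List.pyRange 0 n 1) PySem.Dict.empty
    (PySem.List.pyRange 0 n 1).length).1

def verify_assignment_alt (cost_matrix : List (List Int)) (assignment : List (Int × Int)) (reported_total : Int) (check_optimal : Bool) : Bool × String :=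
  let n : Int := PySem.List.len cost_matrix
  if n = 0 then
    if assignment ≠ [] then (false, "Expected empty assignment for empty matrix.")
    else if reported_total ≠ 0 then (false, "Expected zero cost for empty matrix.")
    else (true, "Valid empty assignment.")
  else if PySem.List.len assignment ≠ n then
    (false, "Assignment size does not match matrix size.")
  else
    let rows := assignment.map (fun pair => pair.1)
    let cols := assignment.map (fun pair => pair.2)
    if !PySem.Set.equal (PySem.Set.ofList rows) (PySem.Set.ofList (PySem.List.pyRange 0 n 1)) then
      (false, "Rows are not assigned exactly once.")
    else if !PySem.Set.equal (PySem.Set.ofList cols) (PySem.Set.ofList (PySem.List.pyRange 0 n 1)) then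
      (false, "Columns are not assigned exactly once.")
    else
      let computed_total : Int := assignment.foldl
        (fun s p => s + PySem.List.pyGetD (PySem.List.pyGetD cost_matrix p.1 []) p.2 0) 0
      if computed_total ≠ reported_total then
        (false, "Reported total cost does not match assignment sum.")
      else if check_optimal = true then
        let best_possible := dp_min_cost cost_matrix
        if reported_total ≠ best_possible then
          (false, "Non-optimal result: got " ++ PySem.Int.toStr reported_total ++ ", expected "
            ++ PySem.Int.toStr best_possible ++ ".")
        else (true, "Assignment is valid and optimal.")
      else (true, "Assignment is valid and optimal.")

-- ===== PRECONDITION & SPEC =====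

-- Pre_ excludes exactly the inputs on which the Python A raises IndexError on a
-- too-short matrix row: in the assignment sum (some assigned entry is out of its
-- row's range), or in the brute-force optimality scan (reached only when the sum
-- matches reported_total and check_optimal is set, and raising iff some row is
-- shorter than n).  On every input A returns on, Pre_ holds.
def Pre_verify_assignment (cost_matrix : List (List Int)) (assignment : List (Int × Int)) (reported_total : Int) (check_optimal : Bool) : Prop :=
  ((assignment.map (fun p => p.1)).Perm (PySem.List.pyRange 0 (PySem.List.len cost_matrix) 1) ∧
   (assignment.map (fun p => p.2)).Perm (PySem.List.pyRange 0 (PySem.List.len cost_matrix) 1)) →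
  ((∀ p ∈ assignment, p.2 < PySem.List.len (PySem.List.pyGetD cost_matrix p.1 [])) ∧
   ((check_optimal = true ∧
     assignment.foldl (fun s p => s + PySem.List.pyGetD (PySem.List.pyGetD cost_matrix p.1 []) p.2 0) 0
       = reported_total) →
    ∀ r ∈ cost_matrix, PySem.List.len cost_matrix ≤ PySem.List.len r))

instance (cost_matrix : List (List Int)) (assignment : List (Int × Int)) (reported_total : Int) (check_optimal : Bool) : Decidable (Pre_verify_assignment cost_matrix assignment reported_total check_optimal) := by unfold Pre_verify_assignment; infer_instance

def pvWitness_verify_assignment : List (List Int) × (List (Int × Int)) × Int × Bool :=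
  ([[1, 2], [3, 4]], [(0, 1), (1, 0)], 5, true)

def Spec_verify_assignment (cost_matrix : List (List Int)) (assignment : List (Int × Int)) (reported_total : Int) (check_optimal : Bool) (out : Bool × String) : Prop := out = verify_assignment_alt cost_matrix assignment reported_total check_optimal
instance (cost_matrix : List (List Int)) (assignment : List (Int × Int)) (reported_total : Int) (check_optimal : Bool) (out : Bool × String) : Decidable (Spec_verify_assignment cost_matrix assignment reported_total check_optimal out) := by unfold Spec_verify_assignment; infer_instance

-- ===== CLAIM (what is proved, stated in full; the proofs are below) =====
def Claim_equal_verify_assignment : Prop := ∀ (cost_matrix : List (List Int)) (assignment : List (Int × Int)) (reported_total : Int) (check_optimal : Bool), Dom_verify_assignment cost_matrix assignment reported_total check_optimal → Pre_verify_assignment cost_matrix assignment reported_total check_optimal → Spec_verify_assignment cost_matrix assignment reported_total check_optimal (verify_assignment cost_matrix assignment reported_total check_optimal)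

-- ===== LEMMAS AND PROOFS =====

-- running strict-min update (A's `if total < best`, B's `if best is None or cand < best`)
def mstep (b : Option Int) (t : Int) : Option Int :=
  match b with
  | none => some t
  | some x => if t < x then some t else b

def listMin (l : List Int) : Option Int := l.foldl mstep none

def omin (a b : Option Int) : Option Int :=
  match a, b with
  | none, b => b
  | some x, none => some x
  | some x, some y => if y < x then some y else some x

-- positional cost of a permutation against a list of rows
def tc : List (List Int) → List Int → Int
  | _, [] => 0
  | rows, c :: p => PySem.List.pyGetD (rows.getD 0 []) c 0 + tc rows.tail p

-- memo-free mirror of dp_solve / dp_loop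
mutual
def pure_solve (cost_matrix : List (List Int)) (i : Int) (cols : List Int) (fuel : Nat) : Int :=
  if cols.isEmpty then 0
  else
    match fuel with
    | 0 => 0
    | fuel' + 1 =>
      let row := PySem.List.pyGetD cost_matrix i []
      (pure_loop cost_matrix i cols row (PySem.List.pyRange 0 (PySem.List.len cols) 1) none fuel').getD 0
  termination_by (fuel, 0)

def pure_loop (cost_matrix : List (List Int)) (i : Int) (cols row : List Int)
    (pending : List Int) (best : Option Int) (fuel' : Nat) : Option Int :=
  match pending with
  | [] => best
  | k :: rest =>
    let restCols := PySem.List.slice cols none (some k) ++ PySem.List.slice cols (some (k + 1)) none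
    let cand := PySem.List.pyGetD row (PySem.List.pyGetD cols k 0) 0 +
      pure_solve cost_matrix (i + 1) restCols fuel'
    pure_loop cost_matrix i cols row rest (mstep best cand) fuel'
  termination_by (fuel', pending.length + 1)
end

def MemoOK (cost_matrix : List (List Int)) (memo : PySem.Dict (List Int) Int) : Prop :=
  ∀ ks v, memo.get? ks = some v →
    v = pure_solve cost_matrix ((cost_matrix.length : Int) - ks.length) ks ks.length

lemma omin_assoc (a b c : Option Int) : omin (omin a b) c = omin a (omin b c) := by
  cases a <;> cases b <;> cases c <;> simp only [omin] <;> (try rfl) <;>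
    split_ifs <;> simp only [omin] <;> (try rfl) <;> split_ifs <;> (try rfl) <;>
    simp only [Option.some.injEq] <;> omega

lemma mstep_eq_omin (b : Option Int) (t : Int) : mstep b t = omin b (some t) := by
  cases b <;> rfl

lemma foldl_mstep (l : List Int) (b : Option Int) : l.foldl mstep b = omin b (listMin l) := by
  induction l generalizing b with
  | nil => cases b <;> rfl
  | cons x t ih =>
    show (t.foldl mstep (mstep b x)) = _
    rw [ih]
    have h2 : listMin (x :: t) = omin (some x) (listMin t) := by
      show List.foldl mstep (mstep none x) t = _
      rw [ih]; rfl
    rw [h2, mstep_eq_omin, omin_assoc]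

lemma listMin_cons (x : Int) (t : List Int) : listMin (x :: t) = omin (some x) (listMin t) := by
  show t.foldl mstep (mstep none x) = _
  rw [foldl_mstep]; rfl

lemma listMin_map_add (a : Int) (l : List Int) :
    listMin (l.map (fun x => a + x)) = (listMin l).map (fun x => a + x) := by
  induction l with
  | nil => rfl
  | cons x t ih =>
    rw [List.map_cons, listMin_cons, listMin_cons, ih]
    cases h : listMin t with
    | none => rfl
    | some v =>
      simp only [omin, Option.map_some]
      split_ifs with h1 h2 h2 <;> simp_all

lemma listMin_isSome (l : List Int) (h : l ≠ []) : ∃ v, listMin l = some v := by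
  cases l with
  | nil => exact absurd rfl h
  | cons x t =>
    rw [listMin_cons]
    cases listMin t with
    | none => exact ⟨x, rfl⟩
    | some v => simp only [omin]; split_ifs <;> exact ⟨_, rfl⟩

lemma listMin_append (l₁ l₂ : List Int) : listMin (l₁ ++ l₂) = omin (listMin l₁) (listMin l₂) := by
  show (l₁ ++ l₂).foldl mstep none = _
  rw [List.foldl_append, foldl_mstep]; rfl

lemma listMin_flatMap {α : Type} (l : List α) (g : α → List Int) :
    listMin (l.flatMap g) = l.foldl (fun b x => omin b (listMin (g x))) none := by
  have key : ∀ (l : List α) (b : Option Int),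
      omin b (listMin (l.flatMap g)) = l.foldl (fun b x => omin b (listMin (g x))) b := by
    intro l
    induction l with
    | nil => intro b; cases b <;> rfl
    | cons x t ih =>
      intro b
      rw [List.flatMap_cons, listMin_append, ← omin_assoc, List.foldl_cons, ih]
  have := key l none
  rwa [show omin none (listMin (l.flatMap g)) = listMin (l.flatMap g) from rfl] at this

lemma perms_ne_nil (xs : List Int) : PySem.List.permutations xs xs.length ≠ [] := by
  induction xs with
  | nil => simp [PySem.List.permutations_zero]
  | cons x t ih =>
    intro h
    rw [show (x :: t).length = t.length + 1 from rfl, PySem.List.permutations_succ,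
      List.flatMap_eq_nil_iff] at h
    have h0 := h 0 (by simp)
    simp only [List.getElem?_cons_zero, List.eraseIdx_cons_zero] at h0
    rw [List.map_eq_nil_iff] at h0
    exact ih h0

lemma getD_succ_tail (cost : List (List Int)) (k : Nat) :
    cost.getD (k + 1) [] = cost.tail.getD k [] := by
  cases cost <;> simp

lemma sum_range_tc (perm : List Int) : ∀ (cost : List (List Int)),
    ((List.range perm.length).map
      (fun k => PySem.List.pyGetD (cost.getD k []) (perm.getD k 0) 0)).sum = tc cost perm := by
  induction perm with
  | nil => intro cost; simp [tc]
  | cons c p ih =>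
    intro cost
    rw [show (c :: p).length = p.length + 1 from rfl, List.range_succ_eq_map]
    simp only [List.map_cons, List.map_map, List.sum_cons, List.getD_cons_zero]
    have hmap : (List.range p.length).map
        ((fun k => PySem.List.pyGetD (cost.getD k []) ((c :: p).getD k 0) 0) ∘ Nat.succ) =
        (List.range p.length).map (fun k => PySem.List.pyGetD (cost.tail.getD k []) (p.getD k 0) 0) := by
      apply List.map_congr_left
      intro k _
      simp only [Function.comp_apply, List.getD_cons_succ, getD_succ_tail]
    rw [hmap, ih cost.tail, tc]

lemma none_omin (b : Option Int) : omin none b = b := rfl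

lemma slice_pair_eraseIdx (cols : List Int) (j : Nat) :
    PySem.List.slice cols none (some (j : Int)) ++ PySem.List.slice cols (some ((j : Int) + 1)) none =
      cols.eraseIdx j := by
  rw [PySem.List.slice_to_natCast, show ((j : Int) + 1) = ((j + 1 : Nat) : Int) by push_cast; ring,
    PySem.List.slice_from_natCast]
  exact (List.eraseIdx_eq_take_drop_succ cols j).symm

lemma row_eq (cost : List (List Int)) (i : Int) (hi : 0 ≤ i) :
    PySem.List.pyGetD cost i [] = (cost.drop i.toNat).getD 0 [] := by
  rw [PySem.List.pyGetD_of_nonneg _ _ hi, List.getD_eq_getElem?_getD, List.getD_eq_getElem?_getD,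
    List.getElem?_drop]
  simp

lemma pure_loop_eq_foldl (cost : List (List Int)) (i : Int) (cols row : List Int) (fuel' : Nat) :
    ∀ (pending : List Int) (best : Option Int),
      pure_loop cost i cols row pending best fuel' =
      (pending.map (fun k =>
        PySem.List.pyGetD row (PySem.List.pyGetD cols k 0) 0 +
        pure_solve cost (i + 1)
          (PySem.List.slice cols none (some k) ++ PySem.List.slice cols (some (k + 1)) none)
          fuel')).foldl mstep best := by
  intro pending
  induction pending with
  | nil => intro best; rw [pure_loop]; rfl
  | cons k rest ih =>
    intro best
    rw [pure_loop, List.map_cons, List.foldl_cons]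
    exact ih _

lemma pure_solve_eq_min : ∀ (fuel : Nat) (cost : List (List Int)) (cols : List Int) (i : Int),
    0 ≤ i → fuel = cols.length →
    pure_solve cost i cols fuel =
      (listMin ((PySem.List.permutations cols cols.length).map (tc (cost.drop i.toNat)))).getD 0 := by
  intro fuel
  induction fuel with
  | zero =>
    intro cost cols i hi hlen
    have hc : cols = [] := List.eq_nil_iff_length_eq_zero.mpr hlen.symm
    subst hc
    rw [pure_solve]
    simp [PySem.List.permutations_zero, listMin, mstep, tc]
  | succ fuel ih =>
    intro cost cols i hi hlen
    have hL : cols.length = fuel + 1 := hlen.symm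
    have hne : cols ≠ [] := by intro h; rw [h] at hL; simp at hL
    have hE : cols.isEmpty = false := by simp [hne]
    rw [pure_solve]
    simp only [hE, Bool.false_eq_true, if_false]
    rw [pure_loop_eq_foldl, foldl_mstep, none_omin]
    rw [PySem.List.len_eq, PySem.List.pyRange_one]
    simp only [sub_zero, Int.toNat_natCast, zero_add, List.map_map]
    conv_rhs => rw [hL, PySem.List.permutations_succ]
    rw [List.map_flatMap, listMin_flatMap, listMin, List.foldl_map]
    congr 1
    apply PySem.List.foldl_congr_mem
    intro acc j hj
    have hjlt : j < cols.length := List.mem_range.mp hj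
    have hlen' : (cols.eraseIdx j).length = fuel := by
      rw [List.length_eraseIdx_of_lt hjlt, hL]; omega
    simp only [Function.comp_apply]
    rw [List.getElem?_eq_getElem hjlt]
    rw [slice_pair_eraseIdx]
    rw [PySem.List.pyGetD_natCast cols j 0, List.getD_eq_getElem _ _ hjlt]
    rw [row_eq cost i hi]
    rw [ih cost (cols.eraseIdx j) (i + 1) (by omega) hlen'.symm]
    rw [hlen']
    rw [show (i + 1).toNat = i.toNat + 1 from by omega, ← List.tail_drop]
    rw [List.map_map]
    rw [show (tc (cost.drop i.toNat)) ∘ (fun p => cols[j] :: p) = fun p =>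
      PySem.List.pyGetD ((cost.drop i.toNat).getD 0 []) cols[j] 0 + tc (cost.drop i.toNat).tail p
      from rfl]
    rw [show (fun p => PySem.List.pyGetD ((cost.drop i.toNat).getD 0 []) cols[j] 0 +
        tc (cost.drop i.toNat).tail p) =
      (fun x => PySem.List.pyGetD ((cost.drop i.toNat).getD 0 []) cols[j] 0 + x) ∘
        (tc (cost.drop i.toNat).tail) from rfl, ← List.map_map]
    rw [listMin_map_add]
    obtain ⟨v, hv⟩ := listMin_isSome
      ((PySem.List.permutations (cols.eraseIdx j) fuel).map (tc (cost.drop i.toNat).tail)) (by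
        intro hmm
        rw [List.map_eq_nil_iff] at hmm
        rw [← hlen'] at hmm
        exact perms_ne_nil _ hmm)
    rw [hv]
    simp only [Option.map_some, Option.getD_some]
    exact mstep_eq_omin acc _

lemma dp_loop_ok (fuel : Nat)
    (hS : ∀ (cost : List (List Int)) (cols : List Int) (i : Int)
      (memo : PySem.Dict (List Int) Int), MemoOK cost memo → fuel = cols.length →
      i = (cost.length : Int) - cols.length →
      (dp_solve cost i cols memo fuel).1 = pure_solve cost i cols fuel ∧
        MemoOK cost (dp_solve cost i cols memo fuel).2) :
    ∀ (cost : List (List Int)) (cols row pending : List Int) (best : Option Int) (i : Int)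
      (memo : PySem.Dict (List Int) Int), MemoOK cost memo →
      (∀ k ∈ pending, 0 ≤ k ∧ k.toNat < cols.length) →
      fuel + 1 = cols.length → i = (cost.length : Int) - cols.length →
      (dp_loop cost i cols row pending best memo fuel).1 = pure_loop cost i cols row pending best fuel ∧
        MemoOK cost (dp_loop cost i cols row pending best memo fuel).2 := by
  intro cost cols row pending
  induction pending with
  | nil =>
    intro best i memo hW _ _ _
    rw [dp_loop, pure_loop]
    exact ⟨rfl, hW⟩
  | cons k rest ihp =>
    intro best i memo hW hks hf hi
    obtain ⟨hk0, hklt⟩ := hks k (by simp)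
    rw [dp_loop.eq_def, pure_loop]
    dsimp only
    have hrest : (PySem.List.slice cols none (some k) ++
        PySem.List.slice cols (some (k + 1)) none).length = fuel := by
      rw [PySem.List.slice_to _ hk0, PySem.List.slice_from _ (by omega : (0:Int) ≤ k + 1),
        List.length_append, List.length_take, List.length_drop]
      have h1 : (k + 1).toNat = k.toNat + 1 := by omega
      omega
    obtain ⟨h1, hW'⟩ := hS cost _ (i + 1) memo hW hrest.symm (by rw [hrest, hi, ← hf]; push_cast; ring)
    rw [h1]
    exact ihp _ _ _ hW' (fun k' hk' => hks k' (List.mem_cons_of_mem _ hk')) hf hi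

lemma dp_solve_ok : ∀ (fuel : Nat) (cost : List (List Int)) (cols : List Int) (i : Int)
    (memo : PySem.Dict (List Int) Int), MemoOK cost memo → fuel = cols.length →
    i = (cost.length : Int) - cols.length →
    (dp_solve cost i cols memo fuel).1 = pure_solve cost i cols fuel ∧
      MemoOK cost (dp_solve cost i cols memo fuel).2 := by
  intro fuel
  induction fuel with
  | zero =>
    intro cost cols i memo hW hf hi
    have hc : cols = [] := List.eq_nil_iff_length_eq_zero.mpr hf.symm
    subst hc
    rw [dp_solve, pure_solve]
    exact ⟨rfl, hW⟩
  | succ fuel ihs =>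
    intro cost cols i memo hW hf hi
    have hne : cols ≠ [] := by intro h; rw [h] at hf; simp at hf
    have hE : cols.isEmpty = false := by simp [hne]
    have hpure : pure_solve cost i cols (fuel + 1) =
        (pure_loop cost i cols (PySem.List.pyGetD cost i [])
          (PySem.List.pyRange 0 (PySem.List.len cols) 1) none fuel).getD 0 := by
      rw [pure_solve]
      simp only [hE, Bool.false_eq_true, if_false]
    rw [dp_solve]
    simp only [hE, Bool.false_eq_true, if_false]
    cases hm : memo.get? cols with
    | some v =>
      simp only
      refine ⟨?_, hW⟩
      have := hW cols v hm
      rw [this, ← hi, ← hf]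
    | none =>
      simp only
      have hpend : ∀ k ∈ PySem.List.pyRange 0 (PySem.List.len cols) 1,
          0 ≤ k ∧ k.toNat < cols.length := by
        intro k hk
        rw [PySem.List.len_eq, PySem.List.mem_pyRange_one] at hk
        exact ⟨hk.1, by omega⟩
      obtain ⟨h1, hW'⟩ := dp_loop_ok fuel ihs cost cols (PySem.List.pyGetD cost i [])
        (PySem.List.pyRange 0 (PySem.List.len cols) 1) none i memo hW hpend hf hi
      constructor
      · rw [hpure, h1]
      · intro ks v hv
        rw [PySem.Dict.get?_insert] at hv
        split_ifs at hv with hkc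
        · subst hkc
          rw [← hi, ← hf]
          injection hv with hb
          rw [← hb, h1, hpure]
        · exact hW' ks v hv

lemma map_pyRange_cast {β : Type} (L : Nat) (f : Int → β) :
    (PySem.List.pyRange 0 (L : Int) 1).map f = (List.range L).map (fun (k : Nat) => f (k : Int)) := by
  rw [PySem.List.pyRange_one, List.map_map]
  rw [show ((L : Int) - 0).toNat = L by simp]
  exact List.map_congr_left (fun k _ => by simp)

lemma brute_eq_dp (cost : List (List Int)) : brute_force_min_cost cost = dp_min_cost cost := by
  by_cases h0 : cost.length = 0
  · have hc : cost = [] := List.eq_nil_iff_length_eq_zero.mpr h0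
    subst hc
    simp [brute_force_min_cost, dp_min_cost, dp_solve.eq_def]
  · unfold brute_force_min_cost dp_min_cost
    simp only [PySem.List.len_eq]
    rw [if_neg (by simpa using h0)]
    have hWemp : MemoOK cost PySem.Dict.empty := by
      intro ks v hv
      rw [PySem.Dict.get?_empty] at hv
      cases hv
    have hlenr : (PySem.List.pyRange 0 (cost.length : Int) 1).length = cost.length := by
      rw [PySem.List.length_pyRange_one]; simp
    obtain ⟨h1, -⟩ := dp_solve_ok (PySem.List.pyRange 0 (cost.length : Int) 1).length cost
      (PySem.List.pyRange 0 (cost.length : Int) 1) 0 PySem.Dict.empty hWemp rfl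
      (by rw [hlenr]; omega)
    rw [h1, pure_solve_eq_min _ cost _ 0 le_rfl rfl]
    simp only [Int.toNat_zero, List.drop_zero]
    have hfold : (PySem.List.permutations (PySem.List.pyRange 0 (cost.length : Int) 1)
          (PySem.List.pyRange 0 (cost.length : Int) 1).length).foldl
        (fun best perm =>
          let total : Int := (PySem.List.pyRange 0 (cost.length : Int) 1).foldl
            (fun s i => s + PySem.List.pyGetD (PySem.List.pyGetD cost i [])
              (PySem.List.pyGetD perm i 0) 0) 0
          match best with
          | none => some total
          | some b => if total < b then some total else best) none =
        listMin ((PySem.List.permutations (PySem.List.pyRange 0 (cost.length : Int) 1)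
          (PySem.List.pyRange 0 (cost.length : Int) 1).length).map
          (fun perm => (PySem.List.pyRange 0 (cost.length : Int) 1).foldl
            (fun s i => s + PySem.List.pyGetD (PySem.List.pyGetD cost i [])
              (PySem.List.pyGetD perm i 0) 0) 0)) := by
      rw [listMin, List.foldl_map]
      rfl
    rw [hfold]
    congr 2
    apply List.map_congr_left
    intro perm hperm
    have hpl : perm.length = cost.length :=
      (PySem.List.perm_of_mem_permutations hperm).length_eq.trans hlenr
    rw [PySem.List.foldl_add, zero_add]
    rw [map_pyRange_cast cost.length
      (fun i => PySem.List.pyGetD (PySem.List.pyGetD cost i []) (PySem.List.pyGetD perm i 0) 0)]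
    have hmap : (List.range cost.length).map
        (fun (k : Nat) => PySem.List.pyGetD (PySem.List.pyGetD cost (k : Int) [])
          (PySem.List.pyGetD perm (k : Int) 0) 0) =
        (List.range cost.length).map
          (fun k => PySem.List.pyGetD (cost.getD k []) (perm.getD k 0) 0) :=
      List.map_congr_left (fun k _ => by
        rw [PySem.List.pyGetD_natCast, PySem.List.pyGetD_natCast])
    rw [hmap, ← hpl, sum_range_tc]

lemma ofList_sublist (xs : List Int) : (PySem.Set.ofList xs).Sublist xs := by
  induction xs using List.reverseRecOn with
  | nil => simp [PySem.Set.ofList_nil]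
  | append_singleton xs x ih =>
    rw [PySem.Set.ofList_append_singleton, PySem.Set.add_eq_ite]
    split_ifs
    · exact ih.trans (List.sublist_append_left _ _)
    · exact ih.append (List.Sublist.refl _)

lemma perm_check_iff (xs : List Int) (L : Nat) (h : xs.length = L) :
    PySem.List.sorted xs (fun x => x) = PySem.List.pyRange 0 (L : Int) 1 ↔
      PySem.Set.equal (PySem.Set.ofList xs) (PySem.Set.ofList (PySem.List.pyRange 0 (L : Int) 1)) = true := by
  constructor
  · intro h1
    rw [PySem.Set.equal_iff]
    intro y
    rw [PySem.Set.mem_ofList, PySem.Set.mem_ofList]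
    have hp := PySem.List.sorted_perm xs (fun x => x) false
    rw [h1] at hp
    exact hp.symm.mem_iff
  · intro h2
    rw [PySem.Set.equal_iff] at h2
    have hmem : ∀ y, y ∈ PySem.Set.ofList xs ↔ y ∈ PySem.List.pyRange 0 (L : Int) 1 := by
      intro y
      rw [← PySem.Set.mem_ofList (PySem.List.pyRange 0 (L : Int) 1) y]
      exact h2 y
    have hperm1 : (PySem.Set.ofList xs).Perm (PySem.List.pyRange 0 (L : Int) 1) :=
      (List.perm_ext_iff_of_nodup (PySem.Set.nodup_ofList xs)
        (PySem.List.nodup_pyRange_one 0 (L : Int))).mpr hmem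
    have hlen2 : (PySem.Set.ofList xs).length = L := by
      rw [hperm1.length_eq, PySem.List.length_pyRange_one]; simp
    have heq : PySem.Set.ofList xs = xs :=
      List.Sublist.eq_of_length_le (ofList_sublist xs) (by rw [hlen2, h])
    rw [heq] at hperm1
    exact PySem.List.sorted_eq_of_perm_of_pairwise_lt xs (PySem.List.pyRange 0 (L : Int) 1)
      (fun x => x) hperm1.symm (PySem.List.pairwise_lt_pyRange_one 0 (L : Int))

-- ===== VERDICT (by name: the statement is the Claim_ definition above) =====
theorem verify_assignment_spec : Claim_equal_verify_assignment := by
  intro cm asg rt co _dom _pre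
  unfold Spec_verify_assignment
  simp only [verify_assignment, verify_assignment_alt]
  rw [PySem.List.len_eq cm, PySem.List.len_eq asg]
  by_cases h0 : (cm.length : Int) = 0
  · rw [if_pos h0, if_pos h0]
  · rw [if_neg h0, if_neg h0]
    by_cases h1 : (asg.length : Int) = (cm.length : Int)
    case neg => rw [if_pos h1, if_pos h1]
    case pos =>
      have hsz : ¬((asg.length : Int) ≠ (cm.length : Int)) := fun hne => hne h1
      rw [if_neg hsz, if_neg hsz]
      have hlen : asg.length = cm.length := by exact_mod_cast h1
      have hiffR := perm_check_iff (asg.map (fun p => p.1)) cm.length (by simp [hlen])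
      have hiffC := perm_check_iff (asg.map (fun p => p.2)) cm.length (by simp [hlen])
      by_cases h2 : PySem.List.sorted (asg.map (fun p => p.1)) (fun x => x) =
          PySem.List.pyRange 0 (cm.length : Int) 1
      case neg =>
        have hbf : PySem.Set.equal (PySem.Set.ofList (asg.map (fun p => p.1)))
            (PySem.Set.ofList (PySem.List.pyRange 0 (cm.length : Int) 1)) = false := by
          cases hb : PySem.Set.equal (PySem.Set.ofList (asg.map (fun p => p.1)))
              (PySem.Set.ofList (PySem.List.pyRange 0 (cm.length : Int) 1)) with
          | true => exact absurd (hiffR.mpr hb) h2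
          | false => rfl
        rw [if_pos h2]
        simp only [hbf, Bool.not_false, if_true]
      case pos =>
        have hbt := hiffR.mp h2
        rw [if_neg (not_not_intro h2)]
        simp only [hbt, Bool.not_true, Bool.false_eq_true, if_false]
        by_cases h3 : PySem.List.sorted (asg.map (fun p => p.2)) (fun x => x) =
            PySem.List.pyRange 0 (cm.length : Int) 1
        case neg =>
          have hcf : PySem.Set.equal (PySem.Set.ofList (asg.map (fun p => p.2)))
              (PySem.Set.ofList (PySem.List.pyRange 0 (cm.length : Int) 1)) = false := by
            cases hc : PySem.Set.equal (PySem.Set.ofList (asg.map (fun p => p.2)))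
                (PySem.Set.ofList (PySem.List.pyRange 0 (cm.length : Int) 1)) with
            | true => exact absurd (hiffC.mpr hc) h3
            | false => rfl
          rw [if_pos h3]
          simp only [hcf, Bool.not_false, if_true]
        case pos =>
          have hct := hiffC.mp h3
          rw [if_neg (not_not_intro h3)]
          simp only [hct, Bool.not_true, Bool.false_eq_true, if_false]
          rw [brute_eq_dp cm]
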